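-- pv_equiv track=rewrite | github.com/debdattasarkar/DSA | 1. Arrays/57. Minimum Steps to Make Product Equal to One/py_sol.py | makeProductOne
-- ===== SOURCE A (Python) =====
-- def makeProductOne(arr, N):
--     # code here
--     steps = 0
--     neg_count = 0
--     zero_count = 0
--
--     for num in arr:
--         if num == 0:
--             zero_count += 1
--             steps += 1  # change 0 to 1
--         elif num > 0:
--             steps += num - 1  # reduce to 1
--         else:
--             steps += abs(num) - 1  # raise to -1
--             neg_count += 1
--
--     # If negative count is odd and no zeros to flip sign
--     if neg_count % 2 != 0 and zero_count == 0:
--         steps += 2  # Convert one -1 to 1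
--
--     return steps
-- ===== SOURCE B (Python) =====
-- def _solve(xs):
--     # divide and conquer: returns (steps to move every element to +/-1 or 0->1,
--     # parity of negatives as a bool, whether a zero occurs)
--     n = len(xs)
--     if n == 0:
--         return (0, False, False)
--     if n == 1:
--         x = xs[0]
--         if x == 0:
--             return (1, False, True)
--         return (abs(x) - 1, x < 0, False)
--     mid = n // 2
--     s1, o1, z1 = _solve(xs[:mid])
--     s2, o2, z2 = _solve(xs[mid:])
--     return (s1 + s2, o1 != o2, z1 or z2)
--
-- def makeProductOne(arr, N):
--     s, odd, z = _solve(arr)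
--     return s + 2 if (odd and not z) else s
-- ===== Notes on version B (the rewrite author's own statement) =====
-- stated objective: alternative
-- what changed: Replaces the single branchy three-counter accumulator loop by a divide-and-conquer recursion that splits the list in halves and merges (steps, negative-parity bool, has-zero bool) monoidally, applying the +2 sign fix at the top.
import Mathlib
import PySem

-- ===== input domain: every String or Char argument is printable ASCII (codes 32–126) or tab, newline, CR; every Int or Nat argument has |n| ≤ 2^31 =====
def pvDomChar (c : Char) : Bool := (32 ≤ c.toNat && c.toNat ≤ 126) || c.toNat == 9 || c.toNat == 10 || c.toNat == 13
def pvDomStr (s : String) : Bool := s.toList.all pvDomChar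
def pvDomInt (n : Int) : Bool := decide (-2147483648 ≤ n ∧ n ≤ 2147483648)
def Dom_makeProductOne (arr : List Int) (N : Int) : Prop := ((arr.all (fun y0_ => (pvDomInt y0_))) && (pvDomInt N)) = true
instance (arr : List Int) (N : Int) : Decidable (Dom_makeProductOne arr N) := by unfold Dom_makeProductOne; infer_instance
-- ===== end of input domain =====

-- B replaces A's single accumulator loop by a divide-and-conquer recursion merging (steps, negative-parity, has-zero); return value only.

-- ===== PORT A =====
-- loop state: (steps, neg_count, zero_count), updated branch by branch as in A
def makeProductOneLoop (arr : List Int) (st : Int × Int × Int) : Int × Int × Int :=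
  arr.foldl (fun (st : Int × Int × Int) num =>
    let (steps, negc, zeroc) := st
    if num == 0 then (steps + 1, negc, zeroc + 1)
    else if num > 0 then (steps + (num - 1), negc, zeroc)
    else (steps + (|num| - 1), negc + 1, zeroc)) st

def makeProductOne (arr : List Int) (N : Int) : Int :=
  let (steps, negc, zeroc) := makeProductOneLoop arr (0, 0, 0)
  if negc % 2 ≠ 0 ∧ zeroc == 0 then steps + 2 else steps

-- ===== PORT B =====
-- divide and conquer on the list: (steps, parity of negatives, has a zero)
def pvSolve : List Int → Int × Bool × Bool
  | [] => (0, false, false)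
  | [x] => if x == 0 then (1, false, true) else (|x| - 1, decide (x < 0), false)
  | x :: y :: rest =>
    let mid := (x :: y :: rest).length / 2
    let (s1, o1, z1) := pvSolve ((x :: y :: rest).take mid)
    let (s2, o2, z2) := pvSolve ((x :: y :: rest).drop mid)
    (s1 + s2, o1 != o2, z1 || z2)
termination_by xs => xs.length
decreasing_by
  · simp [List.length_take]; omega
  · simp [List.length_drop]; omega

def makeProductOne_alt (arr : List Int) (N : Int) : Int :=
  let (s, odd, z) := pvSolve arr
  if odd ∧ ¬ z then s + 2 else s

-- ===== PRECONDITION & SPEC =====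
def Spec_makeProductOne (arr : List Int) (N : Int) (out : Int) : Prop := out = makeProductOne_alt arr N
instance (arr : List Int) (N : Int) (out : Int) : Decidable (Spec_makeProductOne arr N out) := by unfold Spec_makeProductOne; infer_instance

-- ===== CLAIM (what is proved, stated in full; the proofs are below) =====
def Claim_equal_makeProductOne : Prop := ∀ (arr : List Int) (N : Int), Dom_makeProductOne arr N → Spec_makeProductOne arr N (makeProductOne arr N)

-- ===== LEMMAS AND PROOFS =====

theorem makeProductOneLoop_eq (arr : List Int) (s n z : Int) :
    makeProductOneLoop arr (s, n, z) =
      (s + (arr.map (fun x => |x|)).sum - arr.length + 2 * (arr.countP (fun x => x == 0) : Int),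
       n + (arr.countP (fun x => x < 0) : Int),
       z + (arr.countP (fun x => x == 0) : Int)) := by
  induction arr generalizing s n z with
  | nil => simp [makeProductOneLoop]
  | cons a t ih =>
    have hstep : makeProductOneLoop (a :: t) (s, n, z)
        = makeProductOneLoop t
            (if a == 0 then (s + 1, n, z + 1)
             else if a > 0 then (s + (a - 1), n, z)
             else (s + (|a| - 1), n + 1, z)) := by
      by_cases h0 : a = 0
      · simp [makeProductOneLoop, h0]
      · by_cases hp : a > 0 <;> simp [makeProductOneLoop, h0, hp]
    rw [hstep]
    by_cases h0 : a = 0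
    · simp only [h0, BEq.rfl, if_true]
      rw [ih]
      simp [Prod.ext_iff]
      refine ⟨by ring, by ring⟩
    · by_cases hp : a > 0
      · have hb : (a == 0) = false := by simp [h0]
        simp only [hb, Bool.false_eq_true, if_false, hp, if_true]
        rw [ih]
        have hnl : ¬ a < 0 := not_lt.mpr (le_of_lt hp)
        simp [Prod.ext_iff, h0, hnl, abs_of_pos hp]
        ring
      · have hb : (a == 0) = false := by simp [h0]
        have hn : a < 0 := lt_of_le_of_ne (not_lt.mp hp) h0
        simp only [hb, Bool.false_eq_true, if_false, hp, if_false]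
        rw [ih]
        simp [Prod.ext_iff, h0, hn]
        refine ⟨by ring, by ring⟩

-- closed form of pvSolve, by induction following its divide-and-conquer recursion
theorem pvSolve_eq (xs : List Int) :
    pvSolve xs =
      ((xs.map (fun x => if x = 0 then 1 else |x| - 1)).sum,
       decide (xs.countP (fun x => x < 0) % 2 = 1),
       xs.any (fun x => x == 0)) := by
  fun_induction pvSolve xs with
  | case1 => simp
  | case2 x h => simp_all
  | case3 x h =>
    have h0 : ¬ x = 0 := by simpa using h
    by_cases hn : x < 0 <;> simp [h0, hn]
  | case4 a b r mid s1 o1 z1 h1 s2 o2 z2 h2 ihT ihD =>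
    have e1 := h1.symm.trans ihT
    have e2 := h2.symm.trans ihD
    have hs1 := congrArg Prod.fst e1
    have ho1 := congrArg (fun p : Int × Bool × Bool => p.2.1) e1
    have hz1 := congrArg (fun p : Int × Bool × Bool => p.2.2) e1
    have hs2 := congrArg Prod.fst e2
    have ho2 := congrArg (fun p : Int × Bool × Bool => p.2.1) e2
    have hz2 := congrArg (fun p : Int × Bool × Bool => p.2.2) e2
    simp only at hs1 ho1 hz1 hs2 ho2 hz2
    subst hs1 ho1 hz1 hs2 ho2 hz2
    have hsplit := List.take_append_drop mid (a :: b :: r)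
    refine Prod.ext ?_ (Prod.ext ?_ ?_)
    · simp only
      conv_rhs => rw [← hsplit, List.map_append, List.sum_append]
    · simp only
      conv_rhs => rw [← hsplit, List.countP_append]
      rcases Nat.mod_two_eq_zero_or_one ((List.take mid (a :: b :: r)).countP (fun x => decide (x < 0))) with h | h <;>
        rcases Nat.mod_two_eq_zero_or_one ((List.drop mid (a :: b :: r)).countP (fun x => decide (x < 0))) with h' | h' <;>
          rw [Nat.add_mod, h, h'] <;> simp
    · simp only
      conv_rhs => rw [← hsplit, List.any_append]

theorem cost_sum_eq (xs : List Int) :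
    (xs.map (fun x => if x = 0 then (1 : Int) else |x| - 1)).sum =
      (xs.map (fun x => |x|)).sum - xs.length + 2 * (xs.countP (fun x => x == 0) : Int) := by
  induction xs with
  | nil => simp
  | cons a t ih =>
    by_cases h0 : a = 0
    · simp [h0, ih]; ring
    · simp [h0, ih]; ring

-- ===== VERDICT (by name: the statement is the Claim_ definition above) =====
theorem makeProductOne_spec : Claim_equal_makeProductOne := by
  intro arr N _
  unfold Spec_makeProductOne makeProductOne makeProductOne_alt
  rw [makeProductOneLoop_eq, pvSolve_eq, cost_sum_eq]
  simp only [zero_add]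
  have hany : (arr.any (fun x => x == 0) = true) ↔ ¬ arr.countP (fun x => x == 0) = 0 := by
    rw [List.countP_eq_zero]
    simp [List.any_eq_true]
  split_ifs with hA hB hC
  · rfl
  · exfalso
    obtain ⟨h1, h2⟩ := hA
    have hc0 : arr.countP (fun x => x == 0) = 0 := by exact_mod_cast (beq_iff_eq.mp h2)
    have hcn : arr.countP (fun x => decide (x < 0)) % 2 = 1 := by omega
    refine hB ⟨by simp [hcn], ?_⟩
    simp [hany, hc0]
  · exfalso
    obtain ⟨h1, h2⟩ := hC
    have hcn : arr.countP (fun x => decide (x < 0)) % 2 = 1 := by simpa using h1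
    have hc0 : arr.countP (fun x => x == 0) = 0 := by
      by_contra hc
      exact h2 (hany.mpr hc)
    refine hA ⟨by omega, by exact_mod_cast (beq_iff_eq.mpr (by exact_mod_cast hc0))⟩
  · rfl
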